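-- pv_equiv track=rewrite | github.com/NathanJargon/EscapeFlow | maze_algorithm.py | _guaranteed_path
-- ===== SOURCE A (Python) =====
-- def _guaranteed_path(start, end):
--     # Simple straight path with random turns
--     path = [start]
--     x, y = start
--     while (x, y) != end:
--         if x < end[0]:
--             x += 1
--         elif x > end[0]:
--             x -= 1
--         elif y < end[1]:
--             y += 1
--         elif y > end[1]:
--             y -= 1
--         path.append((x, y))
--     return set(path)
-- ===== SOURCE B (Python) =====
-- def _guaranteed_path(start, end):
--     sx, sy = start
--     ex, ey = end
--     dx = 1 if ex >= sx else -1
--     dy = 1 if ey >= sy else -1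
--     horiz = [(x, sy) for x in range(sx, ex + dx, dx)]
--     vert = [(ex, y) for y in range(sy, ey + dy, dy)]
--     return set(horiz + vert)
-- ===== Notes on version B (the rewrite author's own statement) =====
-- stated objective: simpler
-- what changed: Replaced the per-cell while-loop stepping with a closed-form construction: the result set is the union of two directional range comprehensions (the horizontal segment at y=start[1] and the vertical segment at x=end[0]).
import Mathlib
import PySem

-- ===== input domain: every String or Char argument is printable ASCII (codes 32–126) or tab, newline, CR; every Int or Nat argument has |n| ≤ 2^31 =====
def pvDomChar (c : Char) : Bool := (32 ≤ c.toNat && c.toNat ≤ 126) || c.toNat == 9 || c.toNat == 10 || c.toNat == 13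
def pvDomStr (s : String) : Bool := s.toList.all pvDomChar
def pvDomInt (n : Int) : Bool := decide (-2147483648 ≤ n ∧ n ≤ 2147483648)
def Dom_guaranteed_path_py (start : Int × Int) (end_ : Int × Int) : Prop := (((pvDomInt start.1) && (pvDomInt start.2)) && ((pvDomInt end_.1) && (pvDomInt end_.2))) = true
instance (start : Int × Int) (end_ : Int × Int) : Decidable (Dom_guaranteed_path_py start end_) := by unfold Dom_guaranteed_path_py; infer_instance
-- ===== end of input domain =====

-- B replaces A's per-cell stepping while-loop with a closed-form union of two directional
-- range comprehensions (objective: simpler).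

-- ===== PORT A =====
-- the while loop of A: steps (x,y) one cell at a time towards end_, appending each cell
def pathLoopA (ex ey : Int) (x y : Int) (path : List (Int × Int)) : List (Int × Int) :=
  if (x, y) = (ex, ey) then path
  else if x < ex then pathLoopA ex ey (x + 1) y (path ++ [(x + 1, y)])
  else if x > ex then pathLoopA ex ey (x - 1) y (path ++ [(x - 1, y)])
  else if y < ey then pathLoopA ex ey x (y + 1) (path ++ [(x, y + 1)])
  else if y > ey then pathLoopA ex ey x (y - 1) (path ++ [(x, y - 1)])
  else path
termination_by (ex - x).natAbs + (ey - y).natAbs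
decreasing_by all_goals omega

def guaranteed_path_py (start : Int × Int) (end_ : Int × Int) : List (Int × Int) :=
  PySem.Set.ofList (pathLoopA end_.1 end_.2 start.1 start.2 [start])

-- ===== PORT B =====
def guaranteed_path_py_alt (start : Int × Int) (end_ : Int × Int) : List (Int × Int) :=
  let sx := start.1; let sy := start.2
  let ex := end_.1; let ey := end_.2
  let dx : Int := if ex ≥ sx then 1 else -1
  let dy : Int := if ey ≥ sy then 1 else -1
  let horiz := (PySem.List.pyRange sx (ex + dx) dx).map (fun x => (x, sy))
  let vert := (PySem.List.pyRange sy (ey + dy) dy).map (fun y => (ex, y))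
  PySem.Set.ofList (horiz ++ vert)

-- ===== PRECONDITION & SPEC =====
def Spec_guaranteed_path_py (start : Int × Int) (end_ : Int × Int) (out : List (Int × Int)) : Prop := out = guaranteed_path_py_alt start end_
instance (start : Int × Int) (end_ : Int × Int) (out : List (Int × Int)) : Decidable (Spec_guaranteed_path_py start end_ out) := by unfold Spec_guaranteed_path_py; infer_instance

-- ===== CLAIM (what is proved, stated in full; the proofs are below) =====
def Claim_equal_guaranteed_path_py : Prop := ∀ (start : Int × Int) (end_ : Int × Int), Dom_guaranteed_path_py start end_ → Spec_guaranteed_path_py start end_ (guaranteed_path_py start end_)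

-- ===== LEMMAS AND PROOFS =====

-- the horizontal segment strictly after x, up to ex, at height y
def segX (x ex y : Int) : List (Int × Int) :=
  if x = ex then []
  else if x < ex then (x + 1, y) :: segX (x + 1) ex y
  else (x - 1, y) :: segX (x - 1) ex y
termination_by (ex - x).natAbs
decreasing_by all_goals omega

-- the vertical segment strictly after y, up to ey, at column ex
def segY (ex y ey : Int) : List (Int × Int) :=
  if y = ey then []
  else if y < ey then (ex, y + 1) :: segY ex (y + 1) ey
  else (ex, y - 1) :: segY ex (y - 1) ey
termination_by (ey - y).natAbs
decreasing_by all_goals omega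

theorem segX_nil (x y : Int) : segX x x y = [] := by rw [segX, if_pos rfl]

theorem segX_cons_up (x ex y : Int) (hlt : x < ex) :
    segX x ex y = (x + 1, y) :: segX (x + 1) ex y := by
  rw [segX, if_neg (by omega), if_pos hlt]

theorem segX_cons_down (x ex y : Int) (hgt : ex < x) :
    segX x ex y = (x - 1, y) :: segX (x - 1) ex y := by
  rw [segX, if_neg (by omega), if_neg (by omega)]

theorem segY_nil (ex y : Int) : segY ex y y = [] := by rw [segY, if_pos rfl]

theorem segY_cons_up (ex y ey : Int) (hlt : y < ey) :
    segY ex y ey = (ex, y + 1) :: segY ex (y + 1) ey := by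
  rw [segY, if_neg (by omega), if_pos hlt]

theorem segY_cons_down (ex y ey : Int) (hgt : ey < y) :
    segY ex y ey = (ex, y - 1) :: segY ex (y - 1) ey := by
  rw [segY, if_neg (by omega), if_neg (by omega)]

theorem pathLoopA_eq (ex ey x y : Int) (acc : List (Int × Int)) :
    pathLoopA ex ey x y acc = acc ++ segX x ex y ++ segY ex y ey := by
  fun_induction pathLoopA ex ey x y acc with
  | case1 x y acc h =>
    simp only [Prod.mk.injEq] at h
    obtain ⟨hx, hy⟩ := h
    subst hx; subst hy
    rw [segX_nil, segY_nil]; simp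
  | case2 x y acc h hlt ih =>
    rw [ih, segX_cons_up x ex y hlt]; simp
  | case3 x y acc h hlt hgt ih =>
    rw [ih, segX_cons_down x ex y (by omega)]; simp
  | case4 x y acc h hlt hgt hylt ih =>
    have hx : x = ex := by omega
    subst hx
    rw [ih]
    simp only [segX_nil]
    rw [segY_cons_up _ y _ hylt]; simp
  | case5 x y acc h hlt hgt hylt hygt ih =>
    have hx : x = ex := by omega
    subst hx
    rw [ih]
    simp only [segX_nil]
    rw [segY_cons_down _ y _ (by omega)]; simp
  | case6 x y acc h hlt hgt hylt hygt =>
    have hx : x = ex := by omega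
    have hy : y = ey := by omega
    subst hx; subst hy
    rw [segX_nil, segY_nil]; simp

theorem mem_segX (x ex y : Int) (p : Int × Int) : p ∈ segX x ex y →
    p.2 = y ∧ p.1 ≠ x ∧ ((x < p.1 ∧ p.1 ≤ ex) ∨ (ex ≤ p.1 ∧ p.1 < x)) := by
  fun_induction segX x ex y with
  | case1 => intro hp; simp at hp
  | case2 x h hlt ih =>
    intro hp
    rcases List.mem_cons.mp hp with h1 | h1
    · subst h1; refine ⟨rfl, ?_, ?_⟩ <;> simp <;> omega
    · have := ih h1; omega
  | case3 x h hlt ih =>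
    intro hp
    rcases List.mem_cons.mp hp with h1 | h1
    · subst h1; refine ⟨rfl, ?_, ?_⟩ <;> simp <;> omega
    · have := ih h1; omega

theorem mem_segY (ex y ey : Int) (p : Int × Int) : p ∈ segY ex y ey →
    p.1 = ex ∧ p.2 ≠ y ∧ ((y < p.2 ∧ p.2 ≤ ey) ∨ (ey ≤ p.2 ∧ p.2 < y)) := by
  fun_induction segY ex y ey with
  | case1 => intro hp; simp at hp
  | case2 y h hlt ih =>
    intro hp
    rcases List.mem_cons.mp hp with h1 | h1
    · subst h1; refine ⟨rfl, ?_, ?_⟩ <;> simp <;> omega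
    · have := ih h1; omega
  | case3 y h hlt ih =>
    intro hp
    rcases List.mem_cons.mp hp with h1 | h1
    · subst h1; refine ⟨rfl, ?_, ?_⟩ <;> simp <;> omega
    · have := ih h1; omega

theorem nodup_segX (x ex y : Int) : (segX x ex y).Nodup := by
  fun_induction segX x ex y with
  | case1 => simp
  | case2 x h hlt ih =>
    refine List.nodup_cons.mpr ⟨fun hmem => ?_, ih⟩
    have := mem_segX _ _ _ _ hmem
    simp at this <;> omega
  | case3 x h hlt ih =>
    refine List.nodup_cons.mpr ⟨fun hmem => ?_, ih⟩
    have := mem_segX _ _ _ _ hmem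
    simp at this <;> omega

theorem nodup_segY (ex y ey : Int) : (segY ex y ey).Nodup := by
  fun_induction segY ex y ey with
  | case1 => simp
  | case2 y h hlt ih =>
    refine List.nodup_cons.mpr ⟨fun hmem => ?_, ih⟩
    have := mem_segY _ _ _ _ hmem
    simp at this <;> omega
  | case3 y h hlt ih =>
    refine List.nodup_cons.mpr ⟨fun hmem => ?_, ih⟩
    have := mem_segY _ _ _ _ hmem
    simp at this <;> omega

-- the full path list (start, horizontal segment, vertical segment) has no duplicates
theorem nodup_path (sx sy ex ey : Int) :
    ((sx, sy) :: (segX sx ex sy ++ segY ex sy ey)).Nodup := by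
  refine List.nodup_cons.mpr ⟨?_, ?_⟩
  · intro hmem
    rcases List.mem_append.mp hmem with h1 | h1
    · exact (mem_segX _ _ _ _ h1).2.1 rfl
    · exact (mem_segY _ _ _ _ h1).2.1 rfl
  · refine List.Nodup.append (nodup_segX _ _ _) (nodup_segY _ _ _) ?_
    intro p hp hq
    exact (mem_segY _ _ _ _ hq).2.1 (mem_segX _ _ _ _ hp).1

-- the horizontal endpoint is in the horizontal segment (when it is not the start)
theorem endpoint_mem_segX (x ex y : Int) : x ≠ ex → (ex, y) ∈ segX x ex y := by
  fun_induction segX x ex y with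
  | case1 => intro hh; exact absurd rfl hh
  | case2 x h hlt ih =>
    intro _
    by_cases hx : x + 1 = ex
    · rw [hx]; exact List.mem_cons_self
    · exact List.mem_cons_of_mem _ (ih hx)
  | case3 x h hlt ih =>
    intro _
    by_cases hx : x - 1 = ex
    · rw [hx]; exact List.mem_cons_self
    · exact List.mem_cons_of_mem _ (ih hx)

-- the directional horizontal range of B enumerates start :: segX
theorem range_up_eq_segX (x ex y : Int) : x ≤ ex →
    (PySem.List.pyRange x (ex + 1) 1).map (fun t => (t, y)) = (x, y) :: segX x ex y := by
  fun_induction segX x ex y with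
  | case1 =>
    intro _
    rw [PySem.List.pyRange_one_cons (by omega), PySem.List.pyRange_one_eq_nil (by omega)]
    simp
  | case2 x h hlt ih =>
    intro _
    rw [PySem.List.pyRange_one_cons (by omega)]
    simp only [List.map_cons]
    rw [ih (by omega)]
  | case3 x h hlt ih => intro hx; omega

theorem range_down_eq_segX (x ex y : Int) : ex ≤ x →
    (PySem.List.pyRange x (ex + -1) (-1)).map (fun t => (t, y)) = (x, y) :: segX x ex y := by
  fun_induction segX x ex y with
  | case1 =>
    intro _
    rw [PySem.List.pyRange_neg_one_cons (by omega), PySem.List.pyRange_neg_one_eq_nil (by omega)]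
    simp
  | case2 x h hlt ih => intro hx; omega
  | case3 x h hlt ih =>
    intro _
    rw [PySem.List.pyRange_neg_one_cons (by omega)]
    simp only [List.map_cons]
    rw [ih (by omega)]

-- the directional vertical range of B enumerates (ex, y) :: segY
theorem range_up_eq_segY (ex y ey : Int) : y ≤ ey →
    (PySem.List.pyRange y (ey + 1) 1).map (fun t => (ex, t)) = (ex, y) :: segY ex y ey := by
  fun_induction segY ex y ey with
  | case1 =>
    intro _
    rw [PySem.List.pyRange_one_cons (by omega), PySem.List.pyRange_one_eq_nil (by omega)]
    simp
  | case2 y h hlt ih =>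
    intro _
    rw [PySem.List.pyRange_one_cons (by omega)]
    simp only [List.map_cons]
    rw [ih (by omega)]
  | case3 y h hlt ih => intro hy; omega

theorem range_down_eq_segY (ex y ey : Int) : ey ≤ y →
    (PySem.List.pyRange y (ey + -1) (-1)).map (fun t => (ex, t)) = (ex, y) :: segY ex y ey := by
  fun_induction segY ex y ey with
  | case1 =>
    intro _
    rw [PySem.List.pyRange_neg_one_cons (by omega), PySem.List.pyRange_neg_one_eq_nil (by omega)]
    simp
  | case2 y h hlt ih => intro hy; omega
  | case3 y h hlt ih =>
    intro _
    rw [PySem.List.pyRange_neg_one_cons (by omega)]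
    simp only [List.map_cons]
    rw [ih (by omega)]

theorem add_of_mem {α : Type} [BEq α] [LawfulBEq α] (s : List α) (a : α) (h : a ∈ s) :
    PySem.Set.add s a = s := by
  simp [PySem.Set.add, PySem.Set.contains, h]

theorem add_of_not_mem {α : Type} [BEq α] [LawfulBEq α] (s : List α) (a : α) (h : a ∉ s) :
    PySem.Set.add s a = s ++ [a] := by
  simp [PySem.Set.add, PySem.Set.contains, h]

-- folding Set.add over a list disjoint from a duplicate-free s appends it
theorem foldl_add_of_disjoint {α : Type} [BEq α] [LawfulBEq α] :
    ∀ (r s : List α), s.Nodup → (∀ b ∈ r, b ∉ s) → r.Nodup →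
      r.foldl PySem.Set.add s = s ++ r := by
  intro r
  induction r with
  | nil => intro s _ _ _; simp
  | cons b r ih =>
    intro s hs hdisj hr
    have hb : b ∉ s := hdisj b List.mem_cons_self
    simp only [List.foldl_cons, add_of_not_mem s b hb]
    rw [ih (s ++ [b])]
    · simp
    · refine List.Nodup.append hs (List.nodup_singleton b) ?_
      intro a ha hab
      rw [List.mem_singleton] at hab
      subst hab
      exact hb ha
    · intro c hc
      simp only [List.mem_append, List.mem_singleton]
      rintro (h1 | h1)
      · exact hdisj c (List.mem_cons_of_mem _ hc) h1
      · subst h1; exact (List.nodup_cons.mp hr).1 hc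
    · exact (List.nodup_cons.mp hr).2

-- ===== VERDICT (by name: the statement is the Claim_ definition above) =====
theorem guaranteed_path_py_spec : Claim_equal_guaranteed_path_py := by
  intro start end_ _
  obtain ⟨sx, sy⟩ := start
  obtain ⟨ex, ey⟩ := end_
  show guaranteed_path_py (sx, sy) (ex, ey) = guaranteed_path_py_alt (sx, sy) (ex, ey)
  have hA : guaranteed_path_py (sx, sy) (ex, ey)
      = (sx, sy) :: (segX sx ex sy ++ segY ex sy ey) := by
    unfold guaranteed_path_py
    rw [pathLoopA_eq]
    simp only [List.cons_append, List.nil_append]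
    exact PySem.Set.ofList_eq_self_of_nodup _ (nodup_path sx sy ex ey)
  have hH : ((PySem.List.pyRange sx (ex + (if ex ≥ sx then 1 else -1)) (if ex ≥ sx then 1 else -1)).map
        (fun x => (x, sy))) = (sx, sy) :: segX sx ex sy := by
    by_cases hd : ex ≥ sx
    · rw [if_pos hd]; exact range_up_eq_segX sx ex sy hd
    · rw [if_neg hd]; exact range_down_eq_segX sx ex sy (by omega)
  have hV : ((PySem.List.pyRange sy (ey + (if ey ≥ sy then 1 else -1)) (if ey ≥ sy then 1 else -1)).map
        (fun y => (ex, y))) = (ex, sy) :: segY ex sy ey := by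
    by_cases hd : ey ≥ sy
    · rw [if_pos hd]; exact range_up_eq_segY ex sy ey hd
    · rw [if_neg hd]; exact range_down_eq_segY ex sy ey (by omega)
  have hHnodup : ((sx, sy) :: segX sx ex sy).Nodup := by
    refine List.nodup_cons.mpr ⟨fun hmem => ?_, nodup_segX _ _ _⟩
    exact (mem_segX _ _ _ _ hmem).2.1 rfl
  have hVnodup : ((ex, sy) :: segY ex sy ey).Nodup := by
    refine List.nodup_cons.mpr ⟨fun hmem => ?_, nodup_segY _ _ _⟩
    exact (mem_segY _ _ _ _ hmem).2.1 rfl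
  have hcorner : (ex, sy) ∈ (sx, sy) :: segX sx ex sy := by
    by_cases hx : sx = ex
    · subst hx; exact List.mem_cons_self
    · exact List.mem_cons_of_mem _ (endpoint_mem_segX sx ex sy hx)
  have hB : guaranteed_path_py_alt (sx, sy) (ex, ey)
      = PySem.Set.ofList (((sx, sy) :: segX sx ex sy) ++ ((ex, sy) :: segY ex sy ey)) := by
    show PySem.Set.ofList
        (((PySem.List.pyRange sx (ex + (if ex ≥ sx then 1 else -1)) (if ex ≥ sx then 1 else -1)).map
            (fun x => (x, sy))) ++
          ((PySem.List.pyRange sy (ey + (if ey ≥ sy then 1 else -1)) (if ey ≥ sy then 1 else -1)).map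
            (fun y => (ex, y)))) = _
    rw [hH, hV]
  have hofl : PySem.Set.ofList (((sx, sy) :: segX sx ex sy) ++ ((ex, sy) :: segY ex sy ey))
      = ((sx, sy) :: segX sx ex sy) ++ segY ex sy ey := by
    rw [PySem.Set.ofList_eq_foldl, List.foldl_append, ← PySem.Set.ofList_eq_foldl,
      PySem.Set.ofList_eq_self_of_nodup _ hHnodup]
    simp only [List.foldl_cons, add_of_mem _ _ hcorner]
    refine foldl_add_of_disjoint _ _ hHnodup ?_ (nodup_segY _ _ _)
    intro b hb hmem
    rcases List.mem_cons.mp hmem with h1 | h1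
    · have h2 := mem_segY _ _ _ _ hb
      rw [h1] at h2
      exact h2.2.1 rfl
    · exact (mem_segY _ _ _ _ hb).2.1 (mem_segX _ _ _ _ h1).1
  rw [hA, hB, hofl]
  simp
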